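-- pv_equiv track=rewrite | github.com/peter-k-1972/linux-desktop-ai-chat | linux-desktop-chat-workflows/src/app/workflows/validation/graph_validator.py | _backward_reach_to_set
-- ===== SOURCE A (Python) =====
-- from collections import defaultdict, deque
-- from typing import Dict, List, Set, Tuple
--
-- def _backward_reach_to_set(
--
--     targets: Set[str],
--     radj: Dict[str, List[str]],
--     nodes: Set[str],
-- ) -> Set[str]:
--     out: Set[str] = set()
--     dq = deque([t for t in sorted(targets) if t in nodes])
--     while dq:
--         n = dq.popleft()
--         if n in out:
--             continue
--         if n not in nodes:
--             continue
--         out.add(n)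
--         for w in radj.get(n, ()):
--             if w in nodes and w not in out:
--                 dq.append(w)
--     return out
-- ===== SOURCE B (Python) =====
-- def _backward_reach_to_set(targets, radj, nodes):
--     # Iterative fixpoint: repeatedly scan the whole reached list, unioning in
--     # predecessors, until a full scan adds nothing new.
--     reached = [t for t in sorted(targets) if t in nodes]
--     changed = True
--     while changed:
--         changed = False
--         for n in list(reached):
--             for w in radj.get(n, ()):
--                 if w in nodes and w not in reached:
--                     reached.append(w)
--                     changed = True
--     return set(reached)
-- ===== Notes on version B (the rewrite author's own statement) =====
-- stated objective: alternative
-- what changed: Replaces the deque-based worklist BFS (dedup at pop) with a round-based iterative fixpoint that repeatedly rescans the whole reached list and appends new in-graph predecessors until a full scan adds nothing.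
import Mathlib
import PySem

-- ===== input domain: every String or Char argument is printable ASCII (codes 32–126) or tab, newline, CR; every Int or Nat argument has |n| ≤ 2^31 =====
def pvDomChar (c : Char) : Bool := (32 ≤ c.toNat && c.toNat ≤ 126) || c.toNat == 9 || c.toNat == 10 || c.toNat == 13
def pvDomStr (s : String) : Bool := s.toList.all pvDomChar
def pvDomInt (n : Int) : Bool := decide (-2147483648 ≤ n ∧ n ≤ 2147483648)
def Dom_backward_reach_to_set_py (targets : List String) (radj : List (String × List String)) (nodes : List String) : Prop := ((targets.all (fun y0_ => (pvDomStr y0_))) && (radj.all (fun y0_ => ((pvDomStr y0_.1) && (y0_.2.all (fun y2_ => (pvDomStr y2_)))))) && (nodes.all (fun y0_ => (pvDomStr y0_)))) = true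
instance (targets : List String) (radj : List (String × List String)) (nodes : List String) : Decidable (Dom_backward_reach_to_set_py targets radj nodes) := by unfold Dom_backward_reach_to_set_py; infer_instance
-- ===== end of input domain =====

-- B replaces the deque worklist BFS (dedup at pop) by a round-based iterative fixpoint that
-- rescans the whole reached list until a full scan adds nothing (alternative algorithm, not faster).

-- radj.get(n, ()) — Python dict lookup with default (first matching key of the association list)
def pvAdj (radj : List (String × List String)) (n : String) : List String :=
  PySem.Dict.getD ⟨radj⟩ n []

-- ===== PORT A =====
-- termination helpers for the worklist loop (cited in decreasing_by)
theorem pv_filter_len_le (p p' : String → Bool) (h : ∀ x, p' x = true → p x = true) :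
    ∀ l : List String, (l.filter p').length ≤ (l.filter p).length := by
  intro l; induction l with
  | nil => simp
  | cons a l ih =>
    simp only [List.filter_cons]
    by_cases h' : p' a = true
    · simp only [h', h a h', if_true, List.length_cons]; omega
    · simp only [h', Bool.false_eq_true, if_false]
      by_cases hpa : p a = true
      · simp only [hpa, if_true, List.length_cons]; omega
      · simp only [hpa, Bool.false_eq_true, if_false]; omega

theorem pv_filter_len_lt (p p' : String → Bool) (h : ∀ x, p' x = true → p x = true)
    (n : String) : ∀ l : List String, n ∈ l → p n = true → p' n = false →
    (l.filter p').length < (l.filter p).length := by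
  intro l; induction l with
  | nil => simp
  | cons a l ih =>
    intro hmem hp hp'
    rcases List.mem_cons.mp hmem with rfl | hmem
    · simp only [List.filter_cons, hp, hp', Bool.false_eq_true, if_false, if_true, List.length_cons]
      have := pv_filter_len_le p p' h l
      omega
    · have hrec := ih hmem hp hp'
      simp only [List.filter_cons]
      by_cases h' : p' a = true
      · simp only [h', h a h', if_true, List.length_cons]; omega
      · simp only [h', Bool.false_eq_true, if_false]
        by_cases hpa : p a = true
        · simp only [hpa, if_true, List.length_cons]; omega
        · simp only [hpa, Bool.false_eq_true, if_false]; omega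

theorem pv_adj_len_le (radj : List (String × List String)) (n : String) :
    (pvAdj radj n).length ≤ (radj.map (fun q => q.2.length)).sum := by
  induction radj with
  | nil => simp [pvAdj, PySem.Dict.getD, PySem.Dict.get?]
  | cons p rest ih =>
    simp only [pvAdj, PySem.Dict.getD, PySem.Dict.get?, List.find?] at ih ⊢
    by_cases h : (p.1 == n) = true
    · simp only [h, List.map_cons, List.sum_cons, Option.map_some, Option.getD_some]
      omega
    · simp only [h, List.map_cons, List.sum_cons]
      omega

theorem pv_foldl_append_if (c : String → Bool) :
    ∀ (ws rest : List String),
      ws.foldl (fun q w => if c w then q ++ [w] else q) rest = rest ++ ws.filter c := by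
  intro ws; induction ws with
  | nil => simp
  | cons w ws ih =>
    intro rest
    simp only [List.foldl_cons, List.filter_cons]
    by_cases h : c w = true
    · simp only [h, if_true, ih, List.append_assoc, List.cons_append, List.nil_append]
    · simp only [h, Bool.false_eq_true, if_false, ih]

-- A's loop: state (out, dq); pops the head, dedups at pop, appends in-graph predecessors
def aLoop (radj : List (String × List String)) (nodes : List String)
    (out : List String) (dq : List String) : List String :=
  match dq with
  | [] => out
  | n :: rest =>
    if PySem.Set.contains out n then aLoop radj nodes out rest
    else if !(PySem.Set.contains nodes n) then aLoop radj nodes out rest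
    else
      let out' := PySem.Set.add out n
      aLoop radj nodes out'
        ((pvAdj radj n).foldl
          (fun q w => if PySem.Set.contains nodes w && !(PySem.Set.contains out' w) then q ++ [w] else q)
          rest)
termination_by
  (nodes.filter (fun x => !(out.contains x))).length * ((radj.map (fun q => q.2.length)).sum + 1) + dq.length
decreasing_by
  · simp only [List.length_cons]; omega
  · simp only [List.length_cons]; omega
  · rename_i h1 h2
    simp only [PySem.Set.contains, Bool.not_eq_eq_eq_not, Bool.not_true] at h1 h2
    simp only [dite_eq_ite]
    rw [pv_foldl_append_if (fun w => PySem.Set.contains nodes w && !(PySem.Set.contains (PySem.Set.add out n) w))]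
    have hadd : PySem.Set.add out n = out ++ [n] := by
      apply PySem.Set.add_of_not_mem
      simp only [← List.contains_iff_mem, h1]; simp
    set S := (radj.map (fun q => q.2.length)).sum
    have hflt : ((pvAdj radj n).filter
        (fun w => PySem.Set.contains nodes w && !(PySem.Set.contains (PySem.Set.add out n) w))).length ≤ S := by
      have := List.length_filter_le
        (fun w => PySem.Set.contains nodes w && !(PySem.Set.contains (PySem.Set.add out n) w)) (pvAdj radj n)
      have := pv_adj_len_le radj n
      omega
    have hcn : nodes.contains n = true := by revert h2; cases nodes.contains n <;> simp
    have hon : out.contains n = false := by revert h1; cases out.contains n <;> simp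
    have hlt : (nodes.filter (fun x => !(List.contains (PySem.Set.add out n) x))).length
        < (nodes.filter (fun x => !(out.contains x))).length := by
      refine pv_filter_len_lt (fun x => !(out.contains x))
        (fun x => !(List.contains (PySem.Set.add out n) x)) ?_ n nodes
        (List.contains_iff_mem.mp hcn) (by simp only [Bool.not_eq_true']; exact hon) ?_
      · intro x hx
        rw [hadd] at hx
        simp only [List.contains_append, Bool.not_eq_true',
          Bool.or_eq_false_iff] at hx ⊢
        exact hx.1
      · rw [hadd]
        simp
    have hmul := Nat.mul_le_mul_right (S + 1) (Nat.succ_le_of_lt hlt)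
    simp only [List.length_append, List.length_cons]
    nlinarith [hflt, hmul]

def backward_reach_to_set_py (targets : List String) (radj : List (String × List String)) (nodes : List String) : List String :=
  aLoop radj nodes PySem.Set.empty
    ((PySem.List.sorted targets (fun x => x) false).filter (fun t => PySem.Set.contains nodes t))

-- ===== PORT B =====
-- inner loop: for w in radj.get(n, ()) — append unseen in-graph predecessors, set the changed flag
def bInner (nodes : List String) (st : List String × Bool) (ws : List String) : List String × Bool :=
  ws.foldl
    (fun st w =>
      if PySem.Set.contains nodes w && !(st.1.contains w) then (st.1 ++ [w], true) else st)
    st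

-- one full scan over the snapshot of reached
def bPass (radj : List (String × List String)) (nodes : List String)
    (snapshot : List String) (st : List String × Bool) : List String × Bool :=
  snapshot.foldl (fun st n => bInner nodes st (pvAdj radj n)) st

-- growth facts needed for the termination of the fixpoint loop
theorem pv_bInner_grow (nodes : List String) :
    ∀ (ws r : List String) (c : Bool), ∃ Δ,
      bInner nodes (r, c) ws = (r ++ Δ, c || !Δ.isEmpty) ∧
      ∀ d ∈ Δ, PySem.Set.contains nodes d = true ∧ r.contains d = false := by
  intro ws; induction ws with
  | nil => intro r c; exact ⟨[], by simp [bInner], by simp⟩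
  | cons w ws ih =>
    intro r c
    by_cases hg : (PySem.Set.contains nodes w && !(r.contains w)) = true
    · obtain ⟨Δ', hΔ'eq, hΔ'⟩ := ih (r ++ [w]) true
      refine ⟨w :: Δ', ?_, ?_⟩
      · simp only [bInner, List.foldl_cons, hg, if_true] at *
        rw [hΔ'eq]
        simp [List.append_assoc]
      · intro d hd
        rcases List.mem_cons.mp hd with rfl | hd
        · exact ⟨(Bool.and_eq_true_iff.mp hg).1, by
            have := (Bool.and_eq_true_iff.mp hg).2
            simpa using this⟩
        · refine ⟨(hΔ' d hd).1, ?_⟩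
          have := (hΔ' d hd).2
          simp only [List.contains_append, Bool.or_eq_false_iff] at this
          exact this.1
    · obtain ⟨Δ, hΔeq, hΔ⟩ := ih r c
      refine ⟨Δ, ?_, hΔ⟩
      simp only [bInner, List.foldl_cons, hg, Bool.false_eq_true, if_false] at *
      exact hΔeq

theorem pv_isEmpty_append (a b : List String) : (a ++ b).isEmpty = (a.isEmpty && b.isEmpty) := by
  cases a <;> simp

theorem pv_bPass_grow (radj : List (String × List String)) (nodes : List String) :
    ∀ (ns r : List String) (c : Bool), ∃ Δ,
      bPass radj nodes ns (r, c) = (r ++ Δ, c || !Δ.isEmpty) ∧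
      ∀ d ∈ Δ, PySem.Set.contains nodes d = true ∧ r.contains d = false := by
  intro ns; induction ns with
  | nil => intro r c; exact ⟨[], by simp [bPass], by simp⟩
  | cons n ns ih =>
    intro r c
    obtain ⟨Δ1, h1eq, h1⟩ := pv_bInner_grow nodes (pvAdj radj n) r c
    obtain ⟨Δ2, h2eq, h2⟩ := ih (r ++ Δ1) (c || !Δ1.isEmpty)
    refine ⟨Δ1 ++ Δ2, ?_, ?_⟩
    · simp only [bPass, List.foldl_cons] at *
      rw [h1eq, h2eq]
      simp [pv_isEmpty_append, Bool.not_and, Bool.or_assoc]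
    · intro d hd
      rcases List.mem_append.mp hd with hd | hd
      · exact h1 d hd
      · refine ⟨(h2 d hd).1, ?_⟩
        have := (h2 d hd).2
        simp only [List.contains_append, Bool.or_eq_false_iff] at this
        exact this.1

-- the while-changed fixpoint loop
def bLoop (radj : List (String × List String)) (nodes : List String)
    (reached : List String) : List String :=
  if h : (bPass radj nodes reached (reached, false)).2 = true then
    bLoop radj nodes (bPass radj nodes reached (reached, false)).1
  else (bPass radj nodes reached (reached, false)).1
termination_by (nodes.filter (fun x => !(reached.contains x))).length
decreasing_by
  obtain ⟨Δ, heq, hΔ⟩ := pv_bPass_grow radj nodes reached reached false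
  rw [heq] at h ⊢
  simp only [Bool.false_or] at h ⊢
  have hne : Δ ≠ [] := by
    intro hnil; rw [hnil] at h; simp at h
  obtain ⟨d, hd⟩ := List.exists_mem_of_ne_nil Δ hne
  refine pv_filter_len_lt (fun x => !(reached.contains x))
    (fun x => !(List.contains (reached ++ Δ) x)) ?_ d nodes
    (List.contains_iff_mem.mp ((hΔ d hd).1)) ?_ ?_
  · intro x hx
    simp only [List.contains_append, Bool.not_eq_true', Bool.or_eq_false_iff] at hx ⊢
    exact hx.1
  · simp only [Bool.not_eq_true']
    exact (hΔ d hd).2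
  · simp only [Bool.not_eq_false', List.contains_append, Bool.or_eq_true_iff]
    exact Or.inr (List.contains_iff_mem.mpr hd)

def backward_reach_to_set_py_alt (targets : List String) (radj : List (String × List String)) (nodes : List String) : List String :=
  PySem.Set.ofList
    (bLoop radj nodes
      ((PySem.List.sorted targets (fun x => x) false).filter (fun t => PySem.Set.contains nodes t)))

-- ===== PRECONDITION & SPEC =====
-- Pre_ requires the `targets` argument to be a duplicate-free list: under the type convention a
-- Python set parameter is represented by the list of its DISTINCT elements, so this excludes no
-- input that an actual Python call can receive (a Python set never holds duplicates).
def Pre_backward_reach_to_set_py (targets : List String) (radj : List (String × List String)) (nodes : List String) : Prop :=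
  targets.Nodup

instance (targets : List String) (radj : List (String × List String)) (nodes : List String) : Decidable (Pre_backward_reach_to_set_py targets radj nodes) := by unfold Pre_backward_reach_to_set_py; infer_instance

def pvWitness_backward_reach_to_set_py : List String × (List (String × List String)) × List String :=
  (["a"], [("a", ["b", "c"]), ("b", ["c"])], ["a", "b", "c"])

def Spec_backward_reach_to_set_py (targets : List String) (radj : List (String × List String)) (nodes : List String) (out : List String) : Prop := out = backward_reach_to_set_py_alt targets radj nodes
instance (targets : List String) (radj : List (String × List String)) (nodes : List String) (out : List String) : Decidable (Spec_backward_reach_to_set_py targets radj nodes out) := by unfold Spec_backward_reach_to_set_py; infer_instance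

-- ===== CLAIM (what is proved, stated in full; the proofs are below) =====
def Claim_equal_backward_reach_to_set_py : Prop := ∀ (targets : List String) (radj : List (String × List String)) (nodes : List String), Dom_backward_reach_to_set_py targets radj nodes → Pre_backward_reach_to_set_py targets radj nodes → Spec_backward_reach_to_set_py targets radj nodes (backward_reach_to_set_py targets radj nodes)

-- ===== LEMMAS AND PROOFS =====

-- generic "guarded squash": append the members of `ws` that are in `nodes` and unseen, in order
def gsq (nodes : List String) (seen ws : List String) : List String :=
  match ws with
  | [] => []
  | w :: ws =>
    if PySem.Set.contains nodes w && !(seen.contains w) then w :: gsq nodes (seen ++ [w]) ws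
    else gsq nodes seen ws

theorem pv_gsq_len_le (nodes : List String) :
    ∀ (ws seen : List String), (gsq nodes seen ws).length ≤ ws.length := by
  intro ws; induction ws with
  | nil => simp [gsq]
  | cons w ws ih =>
    intro seen
    by_cases hg : (PySem.Set.contains nodes w && !(seen.contains w)) = true
    · simp only [gsq, hg, if_true, List.length_cons]
      exact Nat.succ_le_succ (ih _)
    · simp only [gsq, hg, Bool.false_eq_true, if_false, List.length_cons]
      exact Nat.le_succ_of_le (ih _)

theorem pv_gsq_sub (nodes : List String) :
    ∀ (ws seen : List String), ∀ d ∈ gsq nodes seen ws,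
      PySem.Set.contains nodes d = true ∧ seen.contains d = false := by
  intro ws; induction ws with
  | nil => simp [gsq]
  | cons w ws ih =>
    intro seen d hd
    by_cases hg : (PySem.Set.contains nodes w && !(seen.contains w)) = true
    · simp only [gsq, hg, if_true] at hd
      rcases List.mem_cons.mp hd with rfl | hd
      · exact ⟨(Bool.and_eq_true_iff.mp hg).1, by simpa using (Bool.and_eq_true_iff.mp hg).2⟩
      · refine ⟨(ih _ d hd).1, ?_⟩
        have := (ih _ d hd).2
        simp only [List.contains_append, Bool.or_eq_false_iff] at this
        exact this.1
    · simp only [gsq, hg, Bool.false_eq_true, if_false] at hd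
      exact ih _ d hd

theorem pv_gsq_complete (nodes : List String) :
    ∀ (ws seen : List String), ∀ w ∈ ws, PySem.Set.contains nodes w = true →
      (seen ++ gsq nodes seen ws).contains w = true := by
  intro ws; induction ws with
  | nil => simp
  | cons a ws ih =>
    intro seen w hw hn
    rw [List.contains_iff_mem]
    simp only [List.mem_append]
    by_cases hg : (PySem.Set.contains nodes a && !(seen.contains a)) = true
    · simp only [gsq, hg, if_true, List.mem_cons]
      rcases List.mem_cons.mp hw with rfl | hw
      · exact Or.inr (Or.inl rfl)
      · have := ih (seen ++ [a]) w hw hn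
        rw [List.contains_iff_mem] at this
        simp only [List.mem_append, List.mem_singleton] at this
        tauto
    · simp only [gsq, hg, Bool.false_eq_true, if_false]
      rcases List.mem_cons.mp hw with rfl | hw
      · cases hc : seen.contains w with
        | true => exact Or.inl (List.contains_iff_mem.mp hc)
        | false => exact absurd (by rw [hn, hc]; rfl) hg
      · have := ih seen w hw hn
        rw [List.contains_iff_mem] at this
        simpa only [List.mem_append] using this

theorem pv_gsq_append (nodes : List String) :
    ∀ (a b seen : List String),
      gsq nodes seen (a ++ b) = gsq nodes seen a ++ gsq nodes (seen ++ gsq nodes seen a) b := by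
  intro a; induction a with
  | nil => intro b seen; simp [gsq]
  | cons x a ih =>
    intro b seen
    by_cases hg : (PySem.Set.contains nodes x && !(seen.contains x)) = true
    · simp only [List.cons_append, gsq, hg, if_true, ih, List.append_assoc, List.nil_append]
    · simp only [List.cons_append, gsq, hg, Bool.false_eq_true, if_false, ih]

theorem pv_gsq_filter (nodes : List String) (p : String → Bool) :
    ∀ (ws seen : List String),
      (∀ w ∈ ws, p w = false → PySem.Set.contains nodes w = false ∨ seen.contains w = true) →
      gsq nodes seen (ws.filter p) = gsq nodes seen ws := by
  intro ws; induction ws with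
  | nil => simp
  | cons w ws ih =>
    intro seen h
    by_cases hp : p w = true
    · simp only [List.filter_cons, hp, if_true]
      by_cases hg : (PySem.Set.contains nodes w && !(seen.contains w)) = true
      · simp only [gsq, hg, if_true]
        congr 1
        apply ih
        intro w' hw' hpw'
        rcases h w' (List.mem_cons_of_mem w hw') hpw' with h' | h'
        · exact Or.inl h'
        · refine Or.inr ?_
          simp only [List.contains_append, Bool.or_eq_true_iff]
          exact Or.inl h'
      · simp only [gsq, hg, Bool.false_eq_true, if_false]
        exact ih seen (fun w' hw' hpw' => h w' (List.mem_cons_of_mem w hw') hpw')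
    · have hpf : p w = false := by revert hp; cases p w <;> simp
      simp only [List.filter_cons, hpf, Bool.false_eq_true, if_false]
      have hgf : (PySem.Set.contains nodes w && !(seen.contains w)) = false := by
        rcases h w List.mem_cons_self hpf with h' | h'
        · rw [h']; rfl
        · rw [h']; simp
      simp only [gsq, hgf, Bool.false_eq_true, if_false]
      exact ih seen (fun w' hw' hpw' => h w' (List.mem_cons_of_mem w hw') hpw')

theorem pv_gsq_eq_nil (nodes : List String) :
    ∀ (ws seen : List String),
      (∀ w ∈ ws, PySem.Set.contains nodes w = true → seen.contains w = true) →
      gsq nodes seen ws = [] := by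
  intro ws; induction ws with
  | nil => simp [gsq]
  | cons w ws ih =>
    intro seen h
    have hgf : (PySem.Set.contains nodes w && !(seen.contains w)) = false := by
      cases hn : PySem.Set.contains nodes w
      · rfl
      · rw [h w List.mem_cons_self hn]; simp
    simp only [gsq, hgf, Bool.false_eq_true, if_false]
    exact ih seen (fun w' hw' => h w' (List.mem_cons_of_mem w hw'))

theorem pv_gsq_eq_self (nodes : List String) :
    ∀ (ws seen : List String), ws.Nodup →
      (∀ w ∈ ws, PySem.Set.contains nodes w = true ∧ seen.contains w = false) →
      gsq nodes seen ws = ws := by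
  intro ws; induction ws with
  | nil => simp [gsq]
  | cons w ws ih =>
    intro seen hnd h
    have hg : (PySem.Set.contains nodes w && !(seen.contains w)) = true := by
      rw [(h w List.mem_cons_self).1, (h w List.mem_cons_self).2]; rfl
    simp only [gsq, hg, if_true]
    congr 1
    apply ih _ (List.Nodup.of_cons hnd)
    intro w' hw'
    refine ⟨(h w' (List.mem_cons_of_mem w hw')).1, ?_⟩
    have hne : w' ≠ w := by
      intro hEq; subst hEq
      exact (List.nodup_cons.mp hnd).1 hw'
    simp only [List.contains_append, Bool.or_eq_false_iff]
    refine ⟨(h w' (List.mem_cons_of_mem w hw')).2, ?_⟩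
    simpa using hne

-- single-step BFS with dedup at insertion time (the common reference form)
def bfs2 (radj : List (String × List String)) (nodes : List String)
    (out q : List String) : List String :=
  match q with
  | [] => out
  | n :: rest =>
    bfs2 radj nodes (out ++ [n])
      (rest ++ gsq nodes ((out ++ [n]) ++ rest) (pvAdj radj n))
termination_by
  (nodes.filter (fun x => !(List.contains (out ++ q) x))).length * ((radj.map (fun p => p.2.length)).sum + 1) + q.length
decreasing_by
  set S := (radj.map (fun p => p.2.length)).sum
  set g := gsq nodes ((out ++ [n]) ++ rest) (pvAdj radj n) with hgdef
  have hglen : g.length ≤ S := le_trans (pv_gsq_len_le nodes (pvAdj radj n) _) (pv_adj_len_le radj n)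
  have hlist : out ++ [n] ++ rest = out ++ n :: rest := by simp
  by_cases hne : g = []
  · rw [hne]
    simp only [List.append_nil, hlist, List.length_cons]
    omega
  · obtain ⟨d, hd⟩ := List.exists_mem_of_ne_nil g hne
    have hdp := pv_gsq_sub nodes (pvAdj radj n) ((out ++ [n]) ++ rest) d (hgdef ▸ hd)
    have hlt : (nodes.filter (fun x => !(List.contains (out ++ [n] ++ (rest ++ g)) x))).length
        < (nodes.filter (fun x => !(List.contains (out ++ n :: rest) x))).length := by
      refine pv_filter_len_lt _ _ ?_ d nodes ?_ ?_ ?_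
      · intro x hx
        simp only [Bool.not_eq_true', List.contains_append, List.contains_cons,
          Bool.or_eq_false_iff] at hx ⊢
        tauto
      · exact List.contains_iff_mem.mp hdp.1
      · have := hdp.2
        simp only [Bool.not_eq_true', List.contains_append, List.contains_cons,
          Bool.or_eq_false_iff] at this ⊢
        tauto
      · have hdg : List.contains g d = true := List.contains_iff_mem.mpr hd
        simp only [Bool.not_eq_false', List.contains_append, Bool.or_eq_true_iff]
        tauto
    have hmul := Nat.mul_le_mul_right (S + 1) (Nat.succ_le_of_lt hlt)
    simp only [List.length_append, List.length_cons]
    nlinarith [hglen, hmul]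

-- the elements appended during one full scan of `ns`, seen-set threaded left to right
def collect (radj : List (String × List String)) (nodes : List String)
    (seen ns : List String) : List String :=
  match ns with
  | [] => []
  | n :: ns =>
    gsq nodes seen (pvAdj radj n) ++
      collect radj nodes (seen ++ gsq nodes seen (pvAdj radj n)) ns

theorem pv_collect_sub (radj : List (String × List String)) (nodes : List String) :
    ∀ (ns seen : List String), ∀ d ∈ collect radj nodes seen ns,
      PySem.Set.contains nodes d = true ∧ seen.contains d = false := by
  intro ns; induction ns with
  | nil => simp [collect]
  | cons n ns ih =>
    intro seen d hd
    simp only [collect] at hd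
    rcases List.mem_append.mp hd with hd | hd
    · exact pv_gsq_sub nodes (pvAdj radj n) seen d hd
    · have := ih (seen ++ gsq nodes seen (pvAdj radj n)) d hd
      refine ⟨this.1, ?_⟩
      have h2 := this.2
      simp only [List.contains_append, Bool.or_eq_false_iff] at h2
      exact h2.1

theorem pv_collect_complete (radj : List (String × List String)) (nodes : List String) :
    ∀ (ns seen : List String), ∀ n ∈ ns, ∀ w ∈ pvAdj radj n,
      PySem.Set.contains nodes w = true →
      (seen ++ collect radj nodes seen ns).contains w = true := by
  intro ns; induction ns with
  | nil => simp
  | cons m ns ih =>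
    intro seen n hn w hw hnw
    rw [List.contains_iff_mem]
    simp only [collect, List.mem_append]
    rcases List.mem_cons.mp hn with rfl | hn
    · have := pv_gsq_complete nodes (pvAdj radj n) seen w hw hnw
      rw [List.contains_iff_mem] at this
      simp only [List.mem_append] at this
      tauto
    · have := ih (seen ++ gsq nodes seen (pvAdj radj m)) n hn w hw hnw
      rw [List.contains_iff_mem] at this
      simp only [List.mem_append] at this
      tauto

theorem pv_collect_sat (radj : List (String × List String)) (nodes : List String) :
    ∀ (out q seen : List String),
      (∀ n ∈ out, ∀ w ∈ pvAdj radj n, PySem.Set.contains nodes w = true → seen.contains w = true) →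
      collect radj nodes seen (out ++ q) = collect radj nodes seen q := by
  intro out; induction out with
  | nil => simp
  | cons n out ih =>
    intro q seen h
    have hnil : gsq nodes seen (pvAdj radj n) = [] :=
      pv_gsq_eq_nil nodes (pvAdj radj n) seen (h n List.mem_cons_self)
    simp only [List.cons_append, collect, hnil, List.append_nil, List.nil_append]
    exact ih q seen (fun m hm => h m (List.mem_cons_of_mem n hm))

theorem pv_bInner_gsq (nodes : List String) :
    ∀ (ws r : List String) (c : Bool),
      bInner nodes (r, c) ws = (r ++ gsq nodes r ws, c || !(gsq nodes r ws).isEmpty) := by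
  intro ws; induction ws with
  | nil => intro r c; simp [bInner, gsq]
  | cons w ws ih =>
    intro r c
    by_cases hg : (PySem.Set.contains nodes w && !(r.contains w)) = true
    · have : bInner nodes (r, c) (w :: ws) = bInner nodes (r ++ [w], true) ws := by
        simp only [bInner, List.foldl_cons, hg, if_true]
      rw [this, ih]
      simp only [gsq, hg, if_true]
      simp [List.append_assoc]
    · have : bInner nodes (r, c) (w :: ws) = bInner nodes (r, c) ws := by
        simp only [bInner, List.foldl_cons, hg, Bool.false_eq_true, if_false]
      rw [this, ih]
      simp only [gsq, hg, Bool.false_eq_true, if_false]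

theorem pv_bPass_collect (radj : List (String × List String)) (nodes : List String) :
    ∀ (ns r : List String) (c : Bool),
      bPass radj nodes ns (r, c) =
        (r ++ collect radj nodes r ns, c || !(collect radj nodes r ns).isEmpty) := by
  intro ns; induction ns with
  | nil => intro r c; simp [bPass, collect]
  | cons n ns ih =>
    intro r c
    have : bPass radj nodes (n :: ns) (r, c) =
        bPass radj nodes ns (bInner nodes (r, c) (pvAdj radj n)) := by
      simp only [bPass, List.foldl_cons]
    rw [this, pv_bInner_gsq, ih]
    simp only [collect, List.append_assoc, pv_isEmpty_append, Bool.not_and, Bool.or_assoc]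

-- processing a whole level at once: bfs2 over q ++ d defers the appended items past d
theorem pv_bfs2_level (radj : List (String × List String)) (nodes : List String) :
    ∀ (q out d : List String),
      bfs2 radj nodes out (q ++ d) =
        bfs2 radj nodes (out ++ q) (d ++ collect radj nodes (out ++ q ++ d) q) := by
  intro q; induction q with
  | nil => intro out d; simp [collect]
  | cons n q ih =>
    intro out d
    have lhs1 : bfs2 radj nodes out ((n :: q) ++ d) =
        bfs2 radj nodes (out ++ [n])
          ((q ++ d) ++ gsq nodes ((out ++ [n]) ++ (q ++ d)) (pvAdj radj n)) := by
      simp only [List.cons_append, bfs2]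
    rw [lhs1, List.append_assoc, ih (out ++ [n]) (d ++ gsq nodes ((out ++ [n]) ++ (q ++ d)) (pvAdj radj n))]
    simp only [collect, List.append_assoc, List.cons_append, List.nil_append]

-- the fixpoint loop computes single-step BFS, given that `out` is already saturated
theorem pv_bLoop_eq_bfs2 (radj : List (String × List String)) (nodes : List String) :
    ∀ (k : ℕ) (out q : List String),
      (nodes.filter (fun x => !(List.contains (out ++ q) x))).length ≤ k →
      (∀ n ∈ out, ∀ w ∈ pvAdj radj n, PySem.Set.contains nodes w = true →
        List.contains (out ++ q) w = true) →
      bLoop radj nodes (out ++ q) = bfs2 radj nodes out q := by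
  intro k
  induction k with
  | zero =>
    intro out q hk hsat
    have hpass := pv_bPass_collect radj nodes (out ++ q) (out ++ q) false
    have hc : collect radj nodes (out ++ q) (out ++ q) = collect radj nodes (out ++ q) q :=
      pv_collect_sat radj nodes out q (out ++ q)
        (fun n hn w hw hnw => hsat n hn w hw hnw)
    rw [hc] at hpass
    set Δ := collect radj nodes (out ++ q) q with hΔdef
    have hlev : bfs2 radj nodes out q = bfs2 radj nodes (out ++ q) Δ := by
      have := pv_bfs2_level radj nodes q out []
      simpa using this
    by_cases hΔ : Δ = []
    · have hF : ¬ ((bPass radj nodes (out ++ q) (out ++ q, false)).2 = true) := by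
        rw [hpass, hΔ]; simp
      rw [bLoop, dif_neg hF, hpass, hΔ, List.append_nil, hlev, hΔ]
      simp [bfs2]
    · exfalso
      obtain ⟨d, hd⟩ := List.exists_mem_of_ne_nil Δ hΔ
      have hdp := pv_collect_sub radj nodes q (out ++ q) d hd
      have : (nodes.filter (fun x => !(List.contains (out ++ q) x))).length ≠ 0 := by
        intro h0
        have hmem : d ∈ nodes.filter (fun x => !(List.contains (out ++ q) x)) := by
          rw [List.mem_filter]
          exact ⟨List.contains_iff_mem.mp hdp.1, by rw [hdp.2]; rfl⟩
        rw [List.length_eq_zero_iff.mp h0] at hmem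
        exact absurd hmem (List.not_mem_nil)
      omega
  | succ k ih =>
    intro out q hk hsat
    have hpass := pv_bPass_collect radj nodes (out ++ q) (out ++ q) false
    have hc : collect radj nodes (out ++ q) (out ++ q) = collect radj nodes (out ++ q) q :=
      pv_collect_sat radj nodes out q (out ++ q)
        (fun n hn w hw hnw => hsat n hn w hw hnw)
    rw [hc] at hpass
    set Δ := collect radj nodes (out ++ q) q with hΔdef
    have hlev : bfs2 radj nodes out q = bfs2 radj nodes (out ++ q) Δ := by
      have := pv_bfs2_level radj nodes q out []
      simpa using this
    by_cases hΔ : Δ = []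
    · have hF : ¬ ((bPass radj nodes (out ++ q) (out ++ q, false)).2 = true) := by
        rw [hpass, hΔ]; simp
      rw [bLoop, dif_neg hF, hpass, hΔ, List.append_nil, hlev, hΔ]
      simp [bfs2]
    · have hT : ((bPass radj nodes (out ++ q) (out ++ q, false)).2 = true) := by
        rw [hpass]
        cases hΔ' : Δ
        · exact absurd hΔ' hΔ
        · simp
      rw [bLoop, dif_pos hT, hpass]
      have hsat' : ∀ n ∈ out ++ q, ∀ w ∈ pvAdj radj n, PySem.Set.contains nodes w = true →
          List.contains ((out ++ q) ++ Δ) w = true := by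
        intro n hn w hw hnw
        rcases List.mem_append.mp hn with hn | hn
        · have := hsat n hn w hw hnw
          simp only [List.contains_append, Bool.or_eq_true_iff] at this ⊢
          tauto
        · have := pv_collect_complete radj nodes q (out ++ q) n hn w hw hnw
          rw [List.contains_iff_mem] at this ⊢
          simpa using this
      have hlt : (nodes.filter (fun x => !(List.contains ((out ++ q) ++ Δ) x))).length
          < (nodes.filter (fun x => !(List.contains (out ++ q) x))).length := by
        obtain ⟨d, hd⟩ := List.exists_mem_of_ne_nil Δ hΔ
        have hdp := pv_collect_sub radj nodes q (out ++ q) d hd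
        refine pv_filter_len_lt _ _ ?_ d nodes ?_ ?_ ?_
        · intro x hx
          simp only [Bool.not_eq_true', List.contains_append, Bool.or_eq_false_iff] at hx ⊢
          tauto
        · exact List.contains_iff_mem.mp hdp.1
        · rw [hdp.2]; rfl
        · have hdg : List.contains Δ d = true := List.contains_iff_mem.mpr hd
          simp only [Bool.not_eq_false', List.contains_append, Bool.or_eq_true_iff]
          tauto
      have := ih (out ++ q) Δ (by omega) hsat'
      rw [this, hlev]

-- A's dedup-at-pop worklist equals single-step BFS on the squashed queue
theorem pv_aLoop_eq_bfs2 (radj : List (String × List String)) (nodes : List String) :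
    ∀ (out dq : List String),
      (∀ n ∈ dq, PySem.Set.contains nodes n = true) →
      aLoop radj nodes out dq = bfs2 radj nodes out (gsq nodes out dq) := by
  intro out dq
  fun_induction aLoop radj nodes out dq with
  | case1 out =>
    intro _
    simp [gsq, bfs2]
  | case2 out n rest h ih =>
    intro hall
    rw [ih (fun m hm => hall m (List.mem_cons_of_mem _ hm))]
    have h' : List.contains out n = true := h
    have hg : (PySem.Set.contains nodes n && !(List.contains out n)) = false := by
      rw [h']; simp
    simp only [gsq, hg, Bool.false_eq_true, if_false]
  | case3 out n rest h1 h2 ih =>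
    intro hall
    have := hall n List.mem_cons_self
    rw [Bool.not_eq_true'] at h2
    rw [h2] at this
    exact absurd this Bool.false_ne_true
  | case4 out n rest h1 h2 out' ih =>
    intro hall
    have hcn : PySem.Set.contains nodes n = true := hall n List.mem_cons_self
    have hon : List.contains out n = false := by
      cases hc : List.contains out n
      · rfl
      · exact absurd hc h1
    have hnn : n ∉ out := fun hm => h1 (List.contains_iff_mem.mpr hm)
    have hadd : out' = out ++ [n] := by
      have h0 : out' = PySem.Set.add out n := rfl
      rw [h0, PySem.Set.add_of_not_mem hnn]
    simp only [dite_eq_ite] at ih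
    rw [pv_foldl_append_if (fun w => PySem.Set.contains nodes w && !(out'.contains w))] at ih ⊢
    rw [hadd] at ih ⊢
    have hallr : ∀ m ∈ rest ++ (pvAdj radj n).filter
        (fun w => PySem.Set.contains nodes w && !(PySem.Set.contains (out ++ [n]) w)),
        PySem.Set.contains nodes m = true := by
      intro m hm
      rcases List.mem_append.mp hm with hm | hm
      · exact hall m (List.mem_cons_of_mem _ hm)
      · exact (Bool.and_eq_true_iff.mp (List.mem_filter.mp hm).2).1
    rw [ih hallr]
    have hgh : gsq nodes out (n :: rest) = n :: gsq nodes (out ++ [n]) rest := by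
      have hg : (PySem.Set.contains nodes n && !(List.contains out n)) = true := by
        rw [hcn, hon]; rfl
      simp only [gsq, hg, if_true]
    rw [hgh]
    have hbfs : bfs2 radj nodes out (n :: gsq nodes (out ++ [n]) rest) =
        bfs2 radj nodes (out ++ [n])
          (gsq nodes (out ++ [n]) rest ++
            gsq nodes ((out ++ [n]) ++ gsq nodes (out ++ [n]) rest) (pvAdj radj n)) := by
      simp only [bfs2]
    rw [hbfs]
    congr 1
    rw [pv_gsq_append nodes rest _ (out ++ [n])]
    congr 1
    apply pv_gsq_filter
    intro w _ hpw
    rcases Bool.and_eq_false_iff.mp hpw with h' | h'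
    · exact Or.inl h'
    · refine Or.inr ?_
      have hcw : PySem.Set.contains (out ++ [n]) w = true := by
        revert h'; cases PySem.Set.contains (out ++ [n]) w <;> simp
      have hcw' : List.contains (out ++ [n]) w = true := hcw
      simp only [List.contains_append, Bool.or_eq_true_iff] at hcw' ⊢
      tauto

theorem pv_aLoop_nodup (radj : List (String × List String)) (nodes : List String) :
    ∀ (out dq : List String), out.Nodup → (aLoop radj nodes out dq).Nodup := by
  intro out dq
  fun_induction aLoop radj nodes out dq with
  | case1 out => exact id
  | case2 out n rest h ih => exact ih
  | case3 out n rest h1 h2 ih => exact ih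
  | case4 out n rest h1 h2 out' ih =>
    intro hnd
    apply ih
    have h0 : out' = PySem.Set.add out n := rfl
    rw [h0]
    exact PySem.Set.nodup_add out n hnd

-- ===== VERDICT (by name: the statement is the Claim_ definition above) =====
theorem backward_reach_to_set_py_spec : Claim_equal_backward_reach_to_set_py := by
  intro targets radj nodes _hdom hpre
  unfold Spec_backward_reach_to_set_py
  unfold Pre_backward_reach_to_set_py at hpre
  set L0 := (PySem.List.sorted targets (fun x => x) false).filter
      (fun t => PySem.Set.contains nodes t) with hL0
  have hall : ∀ t ∈ L0, PySem.Set.contains nodes t = true := by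
    intro t ht; exact (List.mem_filter.mp ht).2
  have hnodup : L0.Nodup :=
    List.Nodup.filter _ ((PySem.List.sorted_perm targets (fun x => x) false).nodup_iff.mpr hpre)
  have hA : backward_reach_to_set_py targets radj nodes = aLoop radj nodes [] L0 := rfl
  have hgsq : gsq nodes [] L0 = L0 := by
    apply pv_gsq_eq_self nodes L0 [] hnodup
    intro w hw; exact ⟨hall w hw, by simp⟩
  have h1 : aLoop radj nodes [] L0 = bfs2 radj nodes [] L0 := by
    rw [pv_aLoop_eq_bfs2 radj nodes [] L0 hall, hgsq]
  have h2 : bLoop radj nodes L0 = bfs2 radj nodes [] L0 := by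
    have := pv_bLoop_eq_bfs2 radj nodes
      ((nodes.filter (fun x => !(List.contains (([] : List String) ++ L0) x))).length)
      [] L0 (le_refl _) (by intro n hn; simp at hn)
    simpa using this
  have hnod : (bLoop radj nodes L0).Nodup := by
    rw [h2, ← h1]; exact pv_aLoop_nodup radj nodes [] L0 List.nodup_nil
  have hB : backward_reach_to_set_py_alt targets radj nodes = bLoop radj nodes L0 := by
    unfold backward_reach_to_set_py_alt
    rw [← hL0]
    exact PySem.Set.ofList_eq_self_of_nodup _ hnod
  rw [hA, hB, h1, h2]
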